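-- pv_equiv track=rewrite | github.com/MuhannedAlsoradi/Python | Ch4/Lec7/functions.py | occurringVowels
-- ===== SOURCE A (Python) =====
-- def occurringVowels(word):
--     word = word.upper()
--     occurredVowels = []
--     vowels = ('A', 'E', 'I', 'O', 'U')
--     for vowel in vowels:
--         if (vowel in word) and (vowel not in occurredVowels):
--             occurredVowels.append(vowel)
--     return occurredVowels
-- ===== SOURCE B (Python) =====
-- def occurringVowels(word):
--     return sorted({c for c in word.upper() if c in 'AEIOU'})
-- ===== Notes on version B (the rewrite author's own statement) =====
-- stated objective: idiomatic
-- what changed: B collects the distinct vowels of the uppercased word into a set in one scan and SORTS that set (correct because the five vowels are in ascending ASCII order), with no pass over a canonical vowel sequence and no membership tests on the word, whereas A runs five substring searches over the word with an append-accumulator.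
import Mathlib
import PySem

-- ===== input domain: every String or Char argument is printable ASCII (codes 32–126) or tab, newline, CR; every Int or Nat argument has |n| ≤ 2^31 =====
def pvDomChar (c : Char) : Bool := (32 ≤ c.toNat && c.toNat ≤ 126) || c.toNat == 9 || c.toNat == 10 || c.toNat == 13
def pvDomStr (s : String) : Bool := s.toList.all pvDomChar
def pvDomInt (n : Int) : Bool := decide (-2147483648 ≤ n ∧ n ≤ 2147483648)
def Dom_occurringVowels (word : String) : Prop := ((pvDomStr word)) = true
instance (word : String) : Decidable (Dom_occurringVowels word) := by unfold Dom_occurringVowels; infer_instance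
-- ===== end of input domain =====

-- B collects the distinct vowels into a set in one scan of the uppercased word and sorts that set (the five vowels are in ascending ASCII order), instead of A's five substring searches with an append-accumulator; idiomatic re-implementation, same return value.


-- ===== PORT A =====
-- literal transliteration: word = word.upper(); for vowel in ('A','E','I','O','U'): if (vowel in word) and (vowel not in occurredVowels): occurredVowels.append(vowel)
def occurringVowels (word : String) : List String :=
  let word := PySem.Str.upper word
  let vowels : List String := ["A", "E", "I", "O", "U"]
  vowels.foldl
    (fun occurredVowels vowel =>
      if PySem.Str.isIn vowel word = true ∧ vowel ∉ occurredVowels then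
        occurredVowels ++ [vowel]
      else occurredVowels)
    []

-- ===== PORT B =====
-- return sorted({c for c in word.upper() if c in 'AEIOU'})
def occurringVowels_alt (word : String) : List String :=
  PySem.List.sorted
    (PySem.Set.ofList
      (((PySem.Str.upper word).toList.map (fun c => String.ofList [c])).filter
        (fun c => PySem.Str.isIn c "AEIOU")))
    (fun x => x) false

-- ===== PRECONDITION & SPEC =====
def Spec_occurringVowels (word : String) (out : List String) : Prop := out = occurringVowels_alt word
instance (word : String) (out : List String) : Decidable (Spec_occurringVowels word out) := by unfold Spec_occurringVowels; infer_instance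

-- ===== CLAIM (what is proved, stated in full; the proofs are below) =====
def Claim_equal_occurringVowels : Prop := ∀ (word : String), Dom_occurringVowels word → Spec_occurringVowels word (occurringVowels word)

-- ===== LEMMAS AND PROOFS =====

-- A's test `vowel in word` for a one-character string is membership of that character.
theorem isIn_single (v : String) (c : Char) (hv : v.toList = [c]) (s : String) :
    PySem.Str.isIn v s = (s.toList.contains c) := by
  simp only [PySem.Str.isIn_eq, hv]
  by_cases h : c ∈ s.toList
  · simp [h, (PySem.Chars.isIn_iff_infix _ _).mpr ((List.singleton_infix_iff c _).mpr h)]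
  · have hf : PySem.Chars.isIn [c] s.toList = false := by
      cases hx : PySem.Chars.isIn [c] s.toList
      · rfl
      · exact absurd ((List.singleton_infix_iff c _).mp ((PySem.Chars.isIn_iff_infix _ _).mp hx)) h
    simp [hf, h]

-- A's loop output, characterised: the vowels present, filtered out of the canonical list.
theorem portA_eq_filter (word : String) :
    occurringVowels word
      = (["A", "E", "I", "O", "U"] : List String).filter
          (fun v => (PySem.Str.upper word).toList.contains (v.toList.headD 'A')) := by
  unfold occurringVowels
  simp only [List.foldl, List.filter,
    isIn_single "A" 'A' rfl, isIn_single "E" 'E' rfl, isIn_single "I" 'I' rfl,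
    isIn_single "O" 'O' rfl, isIn_single "U" 'U' rfl, PySem.Str.toList_upper]
  by_cases hA : 'A' ∈ PySem.Chars.upper word.toList <;>
  by_cases hE : 'E' ∈ PySem.Chars.upper word.toList <;>
  by_cases hI : 'I' ∈ PySem.Chars.upper word.toList <;>
  by_cases hO : 'O' ∈ PySem.Chars.upper word.toList <;>
  by_cases hU : 'U' ∈ PySem.Chars.upper word.toList <;>
  simp [hA, hE, hI, hO, hU]

-- The set B builds and the filtered canonical list contain the same strings.
theorem mem_set_iff (word : String) (x : String) :
    x ∈ PySem.Set.ofList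
          (((PySem.Str.upper word).toList.map (fun c => String.ofList [c])).filter
            (fun c => PySem.Str.isIn c "AEIOU"))
    ↔ x ∈ (["A", "E", "I", "O", "U"] : List String).filter
            (fun v => (PySem.Str.upper word).toList.contains (v.toList.headD 'A')) := by
  rw [PySem.Set.mem_ofList]
  simp only [List.mem_filter, List.mem_map]
  constructor
  · rintro ⟨⟨c, hc, rfl⟩, hp⟩
    have hcv : c ∈ (['A', 'E', 'I', 'O', 'U'] : List Char) := by
      have := (PySem.Chars.isIn_iff_infix _ _).mp
        (by simpa [PySem.Str.isIn_eq, show ("AEIOU" : String).toList = ['A','E','I','O','U'] from rfl]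
          using hp)
      exact (List.singleton_infix_iff c _).mp this
    fin_cases hcv <;> simp_all
  · rintro ⟨hv, hc⟩
    fin_cases hv <;>
      exact ⟨⟨_, by simpa using hc, rfl⟩, by decide⟩

-- ===== VERDICT (by name: the statement is the Claim_ definition above) =====
theorem occurringVowels_spec : Claim_equal_occurringVowels := by
  intro word _
  unfold Spec_occurringVowels occurringVowels_alt
  rw [portA_eq_filter]
  refine (PySem.List.sorted_eq_of_perm_of_pairwise_lt _ _ _ ?_ ?_).symm
  · refine (List.perm_ext_iff_of_nodup ?_ (PySem.Set.nodup_ofList _)).mpr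
      (fun a => ((mem_set_iff word a).symm))
    exact List.Nodup.filter _ (by decide)
  · refine List.Pairwise.sublist List.filter_sublist ?_
    norm_num [List.pairwise_cons]
    refine ⟨⟨?_, ?_, ?_, ?_⟩, ⟨?_, ?_, ?_⟩, ⟨?_, ?_⟩, ?_⟩ <;>
      exact List.lt_iff_exists.mpr (Or.inr ⟨0, by simp, by simp, by omega, by decide⟩)
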